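-- pv_equiv track=rewrite | github.com/ZacharyGroff/Kattis | 3.0/SquarePegs.py | num_filled_plots
-- ===== SOURCE A (Python) =====
-- def num_filled_plots(plots, houses):
--   result = 0
--   for plot in plots:
--     for house in houses:
--       if plot > house:
--         result += 1
--         houses.remove(house)
--         break
--   return result
-- ===== SOURCE B (Python) =====
-- # B: functional segment tree over house positions (min per node); each plot does a
-- # "leftmost house < plot" descent + removal in O(log m) instead of A's linear rescan.
-- # Note: A mutates `houses` in place (removes matched houses); B does not — the
-- # equivalence is about the return value only.
--
-- def num_filled_plots(plots, houses):
--   def mn(t):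
--     if t[0] == 'L':
--       return t[1] if t[2] else None
--     return t[1]
--
--   def opt_min(a, b):
--     if a is None:
--       return b
--     if b is None:
--       return a
--     return a if a <= b else b
--
--   def build(seg):  # seg nonempty
--     if len(seg) == 1:
--       return ('L', seg[0], True)
--     k = len(seg) // 2
--     lt = build(seg[:k])
--     rt = build(seg[k:])
--     return ('N', opt_min(mn(lt), mn(rt)), lt, rt)
--
--   def pick(t, x):  # precondition: mn(t) is not None and mn(t) < x
--     if t[0] == 'L':
--       return ('L', t[1], False)
--     _, _, l, r = t
--     ml = mn(l)
--     if ml is not None and ml < x: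
--       l = pick(l, x)
--     else:
--       r = pick(r, x)
--     return ('N', opt_min(mn(l), mn(r)), l, r)
--
--   result = 0
--   t = build(houses) if houses else None
--   for x in plots:
--     if t is not None:
--       m = mn(t)
--       if m is not None and m < x:
--         t = pick(t, x)
--         result += 1
--   return result
-- ===== Notes on version B (the rewrite author's own statement) =====
-- stated objective: faster
-- what changed: A rescans the remaining-houses list linearly for every plot; B builds a functional min-segment-tree over the house positions once and answers each plot's 'leftmost remaining house < plot' by an O(log m) descent with point removal.
import Mathlib
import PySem

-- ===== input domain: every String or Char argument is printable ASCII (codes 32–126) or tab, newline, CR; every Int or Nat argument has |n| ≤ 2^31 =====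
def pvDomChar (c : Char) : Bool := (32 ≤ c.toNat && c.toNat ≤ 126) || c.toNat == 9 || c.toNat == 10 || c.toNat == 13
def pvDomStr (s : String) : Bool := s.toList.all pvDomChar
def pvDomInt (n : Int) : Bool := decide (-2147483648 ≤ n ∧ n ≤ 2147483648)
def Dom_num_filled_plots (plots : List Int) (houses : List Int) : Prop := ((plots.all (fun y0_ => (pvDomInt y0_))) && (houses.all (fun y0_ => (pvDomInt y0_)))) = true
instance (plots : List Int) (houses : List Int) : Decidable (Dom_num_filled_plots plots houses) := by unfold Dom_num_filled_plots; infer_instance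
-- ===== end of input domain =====

-- B replaces A's linear rescan of the remaining houses per plot by a min-segment-tree
-- built once over the house positions, answering each plot's "leftmost remaining house
-- smaller than the plot" by an O(log m) descent with point removal (objective: faster).
-- Python A mutates `houses` in place (it removes matched houses); B does not — the
-- equivalence proved here is about the return value only.

-- ===== PORT A =====
-- inner `for house in houses: if plot > house: …remove…break`; the iterated list is the
-- (not yet mutated) current houses, removal happens right before the break.
def innerA (plot : Int) (houses : List Int) : List Int → Int × List Int
  | [] => (0, houses)
  | h :: t =>
      if plot > h then
        -- houses.remove(house): house was produced by iterating houses, so it is present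
        (1, (PySem.List.remove? houses h).getD houses)
      else innerA plot houses t

def num_filled_plots (plots : List Int) (houses : List Int) : Int :=
  (plots.foldl (fun (st : Int × List Int) plot =>
      let r := innerA plot st.2 st.2
      (st.1 + r.1, r.2)) ((0 : Int), houses)).1

-- ===== PORT B =====
-- functional segment tree: leaf = house value + alive flag, node caches the min of its
-- alive leaves (none = no alive leaf below)
inductive HT where
  | lf : Int → Bool → HT
  | nd : Option Int → HT → HT → HT
deriving DecidableEq, Repr

def mnT : HT → Option Int
  | .lf v a => if a then some v else none
  | .nd m _ _ => m

def optMin (a b : Option Int) : Option Int :=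
  match a, b with
  | none, b => b
  | some x, none => some x
  | some x, some y => some (min x y)

def buildT : List Int → HT
  | [] => .lf 0 false      -- unreachable: B only builds nonempty segments
  | [v] => .lf v true
  | a :: b :: t =>
      let k := (a :: b :: t).length / 2
      let lt := buildT ((a :: b :: t).take k)
      let rt := buildT ((a :: b :: t).drop k)
      .nd (optMin (mnT lt) (mnT rt)) lt rt
termination_by l => l.length
decreasing_by all_goals simp [List.length_take]; omega

def pickT (x : Int) : HT → HT
  | .lf v _ => .lf v false
  | .nd _ l r =>
      match mnT l with
      | some ml =>
          if ml < x then
            let l' := pickT x l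
            .nd (optMin (mnT l') (mnT r)) l' r
          else
            let r' := pickT x r
            .nd (optMin (mnT l) (mnT r')) l r'
      | none =>
          let r' := pickT x r
          .nd (optMin (mnT l) (mnT r')) l r'

def num_filled_plots_alt (plots : List Int) (houses : List Int) : Int :=
  let t0 : Option HT := if houses.isEmpty then none else some (buildT houses)
  (plots.foldl (fun (st : Int × Option HT) x =>
      match st.2 with
      | none => st
      | some t =>
          match mnT t with
          | some m => if m < x then (st.1 + 1, some (pickT x t)) else st
          | none => st) ((0 : Int), t0)).1

-- ===== PRECONDITION & SPEC =====
def Spec_num_filled_plots (plots : List Int) (houses : List Int) (out : Int) : Prop := out = num_filled_plots_alt plots houses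
instance (plots : List Int) (houses : List Int) (out : Int) : Decidable (Spec_num_filled_plots plots houses out) := by unfold Spec_num_filled_plots; infer_instance

-- ===== CLAIM (what is proved, stated in full; the proofs are below) =====
def Claim_equal_num_filled_plots : Prop := ∀ (plots : List Int) (houses : List Int), Dom_num_filled_plots plots houses → Spec_num_filled_plots plots houses (num_filled_plots plots houses)

-- ===== LEMMAS AND PROOFS =====

-- alive leaves of a tree, left to right
def present : HT → List Int
  | .lf v a => if a then [v] else []
  | .nd _ l r => present l ++ present r

-- all cached minima are correct
def wfT : HT → Prop
  | .lf _ _ => True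
  | .nd m l r => wfT l ∧ wfT r ∧ m = optMin (mnT l) (mnT r)

-- min of a list as Option
def fmin (l : List Int) : Option Int := l.foldr (fun v a => optMin (some v) a) none

-- remove the first element < x (the semantics of A's inner loop)
def remLt (x : Int) : List Int → Option (List Int)
  | [] => none
  | h :: t => if h < x then some t else (remLt x t).map (h :: ·)

theorem optMin_assoc (a b c : Option Int) : optMin (optMin a b) c = optMin a (optMin b c) := by
  cases a <;> cases b <;> cases c <;> simp [optMin, min_assoc]

theorem fmin_cons (a : Int) (t : List Int) : fmin (a :: t) = optMin (some a) (fmin t) := rfl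

theorem fmin_append (a b : List Int) : fmin (a ++ b) = optMin (fmin a) (fmin b) := by
  induction a with
  | nil => simp [fmin, optMin]
  | cons h t ih => rw [List.cons_append, fmin_cons, fmin_cons, ih, optMin_assoc]

theorem fmin_none_iff (l : List Int) : fmin l = none ↔ l = [] := by
  cases l with
  | nil => simp [fmin]
  | cons h t => rw [fmin_cons]; cases fmin t <;> simp [optMin]

theorem fmin_mem {l : List Int} {m : Int} (h : fmin l = some m) : m ∈ l := by
  induction l generalizing m with
  | nil => simp [fmin] at h
  | cons a t ih =>
      rw [fmin_cons] at h
      cases ht : fmin t with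
      | none => rw [ht] at h; simp [optMin] at h; simp [h]
      | some w =>
          rw [ht] at h; simp [optMin] at h
          by_cases haw : a ≤ w
          · rw [min_eq_left haw] at h; simp [h]
          · rw [min_eq_right (by omega : w ≤ a)] at h
            exact List.mem_cons_of_mem _ (ih (by rw [ht, h]))

theorem fmin_le {l : List Int} {m : Int} (h : fmin l = some m) : ∀ y ∈ l, m ≤ y := by
  induction l generalizing m with
  | nil => simp
  | cons a t ih =>
      rw [fmin_cons] at h
      intro y hy
      cases ht : fmin t with
      | none =>
          have ht' : t = [] := (fmin_none_iff t).mp ht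
          rw [ht] at h; simp [optMin] at h
          subst ht'; simp at hy; omega
      | some w =>
          rw [ht] at h; simp [optMin] at h
          have hl := min_le_left a w
          have hr := min_le_right a w
          rcases List.mem_cons.mp hy with hya | hy
          · subst hya; omega
          · have h1 := ih ht y hy; omega

theorem remLt_none_of {x : Int} {l : List Int} (h : ∀ y ∈ l, ¬ y < x) : remLt x l = none := by
  induction l with
  | nil => rfl
  | cons a t ih =>
      have h1 : ¬ a < x := h a (List.mem_cons_self ..)
      have h2 : ∀ y ∈ t, ¬ y < x := fun y hy => h y (List.mem_cons_of_mem _ hy)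
      simp [remLt, h1, ih h2]

theorem remLt_append_some {x : Int} {a a' : List Int} (b : List Int) (h : remLt x a = some a') :
    remLt x (a ++ b) = some (a' ++ b) := by
  induction a generalizing a' with
  | nil => simp [remLt] at h
  | cons u t ih =>
      simp [remLt] at h ⊢
      by_cases hu : u < x
      · simp [hu] at h ⊢; simp [← h]
      · simp [hu] at h ⊢
        rcases h with ⟨t', ht', rfl⟩
        exact ⟨t' ++ b, ih ht', by simp⟩

theorem remLt_append_none {x : Int} {a : List Int} (b : List Int) (h : ∀ y ∈ a, ¬ y < x) :
    remLt x (a ++ b) = (remLt x b).map (a ++ ·) := by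
  induction a with
  | nil => simp
  | cons u t ih =>
      have h1 : ¬ u < x := h u (List.mem_cons_self ..)
      have h2 : ∀ y ∈ t, ¬ y < x := fun y hy => h y (List.mem_cons_of_mem _ hy)
      simp only [List.cons_append, remLt, if_neg h1, ih h2]
      cases remLt x b <;> simp

-- the cached min is the min of the alive leaves
theorem mn_spec {t : HT} (h : wfT t) : mnT t = fmin (present t) := by
  induction t with
  | lf v a => cases a <;> simp [mnT, present, fmin, optMin]
  | nd m l r ihl ihr =>
      rcases h with ⟨hl, hr, rfl⟩
      show optMin (mnT l) (mnT r) = fmin (present l ++ present r)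
      rw [fmin_append, ihl hl, ihr hr]

-- pickT removes exactly the leftmost alive leaf < x and keeps minima correct
theorem pick_spec {x : Int} {t : HT} (hw : wfT t) (hx : ∃ y ∈ present t, y < x) :
    wfT (pickT x t) ∧ remLt x (present t) = some (present (pickT x t)) := by
  induction t with
  | lf v a =>
      cases a with
      | false => simp [present] at hx
      | true =>
          simp [present] at hx
          simp [pickT, present, remLt, hx, wfT]
  | nd m l r ihl ihr =>
      rcases hw with ⟨hl, hr, rfl⟩
      simp [present] at hx
      cases hml : mnT l with
      | some ml =>
          by_cases hlt : ml < x
          · have hex : ∃ y ∈ present l, y < x := by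
              refine ⟨ml, ?_, hlt⟩
              exact fmin_mem (by rw [← mn_spec hl, hml])
            obtain ⟨hw', hrem⟩ := ihl hl hex
            simp only [pickT, hml, if_pos hlt]
            exact ⟨⟨hw', hr, rfl⟩, by simp [present, remLt_append_some _ hrem]⟩
          · have hnone : ∀ y ∈ present l, ¬ y < x := by
              intro y hy
              have := fmin_le (by rw [← mn_spec hl, hml] : fmin (present l) = some ml) y hy
              omega
            have hex : ∃ y ∈ present r, y < x := by
              rcases hx with ⟨y, hy, hyx⟩
              rcases hy with hy | hy
              · exact absurd hyx (hnone y hy)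
              · exact ⟨y, hy, hyx⟩
            obtain ⟨hw', hrem⟩ := ihr hr hex
            simp only [pickT, hml, if_neg hlt]
            refine ⟨⟨hl, hw', by rw [hml]⟩, ?_⟩
            simp [present, remLt_append_none _ hnone, hrem]
      | none =>
          have hpl : present l = [] := by
            have := mn_spec hl; rw [hml] at this
            exact (fmin_none_iff _).mp this.symm
          have hex : ∃ y ∈ present r, y < x := by
            rcases hx with ⟨y, hy, hyx⟩
            rcases hy with hy | hy
            · simp [hpl] at hy
            · exact ⟨y, hy, hyx⟩
          obtain ⟨hw', hrem⟩ := ihr hr hex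
          simp only [pickT, hml]
          exact ⟨⟨hl, hw', by rw [hml]⟩, by simp [present, hpl, hrem]⟩

theorem build_spec (l : List Int) : wfT (buildT l) ∧ present (buildT l) = l := by
  match l with
  | [] => simp [buildT, wfT, present]
  | [v] => simp [buildT, wfT, present]
  | a :: b :: t =>
      have h1 := build_spec ((a :: b :: t).take ((a :: b :: t).length / 2))
      have h2 := build_spec ((a :: b :: t).drop ((a :: b :: t).length / 2))
      rw [buildT]
      refine ⟨⟨h1.1, h2.1, rfl⟩, ?_⟩
      show present (buildT _) ++ present (buildT _) = _
      rw [h1.2, h2.2, List.take_append_drop]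
termination_by l.length
decreasing_by all_goals simp [List.length_take]; omega

-- A's inner loop, started with prefix `pre` already scanned (nothing in it is < plot)
theorem innerA_go (plot : Int) : ∀ (cur pre houses : List Int), houses = pre ++ cur →
    (∀ y ∈ pre, ¬ y < plot) →
    innerA plot houses cur =
      match remLt plot cur with
      | some c' => (1, pre ++ c')
      | none => (0, houses) := by
  intro cur
  induction cur with
  | nil => intro pre houses _ _; simp [innerA, remLt]
  | cons h t ih =>
      intro pre houses hh hpre
      by_cases hlt : plot > h
      · have hmem : h ∈ houses := by simp [hh]
        have : PySem.List.remove? houses h = some (pre ++ t) := by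
          rw [PySem.List.remove?_eq_some_erase houses h hmem, hh,
              List.erase_append_right _ (by intro hc; exact hpre h hc (by omega)),
              List.erase_cons_head]
        simp [innerA, hlt, remLt, this]
      · have : innerA plot houses (h :: t) = innerA plot houses t := by
          simp [innerA, hlt]
        rw [this, ih (pre ++ [h]) houses (by simp [hh]) (by
          intro y hy; simp at hy
          rcases hy with hy | rfl
          · exact hpre y hy
          · omega)]
        have hnl : ¬ h < plot := by omega
        simp only [remLt, if_neg hnl]
        cases remLt plot t <;> simp

theorem innerA_top (plot : Int) (houses : List Int) :
    innerA plot houses houses =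
      match remLt plot houses with
      | some l' => (1, l')
      | none => (0, houses) := by
  simpa using innerA_go plot houses [] houses rfl (by simp)

-- simulation relation between A's list state and B's tree state
def SimRel (hs : List Int) : Option HT → Prop
  | none => hs = []
  | some t => wfT t ∧ present t = hs

-- the two loop bodies, named for the simulation argument (definitionally the ports' lambdas)
def stepA (st : Int × List Int) (plot : Int) : Int × List Int :=
  let rr := innerA plot st.2 st.2
  (st.1 + rr.1, rr.2)

def stepB (st : Int × Option HT) (x : Int) : Int × Option HT :=
  match st.2 with
  | none => st
  | some t =>
      match mnT t with
      | some m => if m < x then (st.1 + 1, some (pickT x t)) else st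
      | none => st

theorem fold_sim : ∀ (plots : List Int) (r : Int) (hs : List Int) (ot : Option HT), SimRel hs ot →
    (plots.foldl stepA (r, hs)).1 = (plots.foldl stepB (r, ot)).1 := by
  intro plots
  induction plots with
  | nil => intro r hs ot _; rfl
  | cons x ps ih =>
      intro r hs ot hrel
      rw [List.foldl_cons, List.foldl_cons]
      cases ot with
      | none =>
          have hhs : hs = [] := hrel
          subst hhs
          have hA : stepA (r, []) x = (r, []) := by simp [stepA, innerA]
          have hB : stepB (r, none) x = (r, none) := rfl
          rw [hA, hB]
          exact ih r [] none rfl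
      | some t =>
          obtain ⟨hw, hp⟩ := hrel
          cases hm : mnT t with
          | some m =>
              by_cases hlt : m < x
              · have hfm : fmin hs = some m := by rw [← hp, ← mn_spec hw, hm]
                have hex : ∃ y ∈ present t, y < x := ⟨m, by rw [hp]; exact fmin_mem hfm, hlt⟩
                obtain ⟨hw', hrem⟩ := pick_spec hw hex
                rw [hp] at hrem
                have hA : stepA (r, hs) x = (r + 1, present (pickT x t)) := by
                  simp [stepA, innerA_top, hrem]
                have hB : stepB (r, some t) x = (r + 1, some (pickT x t)) := by
                  simp [stepB, hm, hlt]
                rw [hA, hB]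
                exact ih (r + 1) (present (pickT x t)) (some (pickT x t)) ⟨hw', rfl⟩
              · have hfm : fmin hs = some m := by rw [← hp, ← mn_spec hw, hm]
                have hno : remLt x hs = none :=
                  remLt_none_of (fun y hy => by have := fmin_le hfm y hy; omega)
                have hA : stepA (r, hs) x = (r, hs) := by simp [stepA, innerA_top, hno]
                have hB : stepB (r, some t) x = (r, some t) := by simp [stepB, hm, hlt]
                rw [hA, hB]
                exact ih r hs (some t) ⟨hw, hp⟩
          | none =>
              have hhs : hs = [] := by
                rw [← hp]
                exact (fmin_none_iff _).mp (by rw [← mn_spec hw, hm])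
              subst hhs
              have hA : stepA (r, []) x = (r, []) := by simp [stepA, innerA]
              have hB : stepB (r, some t) x = (r, some t) := by simp [stepB, hm]
              rw [hA, hB]
              exact ih r [] (some t) ⟨hw, hp⟩

-- ===== VERDICT (by name: the statement is the Claim_ definition above) =====
theorem num_filled_plots_spec : Claim_equal_num_filled_plots := by
  intro plots houses _
  show (plots.foldl stepA ((0 : Int), houses)).1 =
    (plots.foldl stepB ((0 : Int), if houses.isEmpty then none else some (buildT houses))).1
  apply fold_sim
  cases houses with
  | nil => exact rfl
  | cons a t => exact ⟨(build_spec (a :: t)).1, (build_spec (a :: t)).2⟩
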